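-- pv_equiv track=rewrite | github.com/m1sterzer0/JuliaAtcoder | python/arc110_119/arc119_C.py | solve
-- ===== SOURCE A (Python) =====
-- import collections
--
-- def solve(N,A) :
--     d = collections.defaultdict(int)
--     d[0] = 1; s = 0
--     for (i,a) in enumerate(A) :
--         s += (-1 if i & 1 else 1) * a
--         d[s] += 1
--     ans = 0
--     for (k,v) in d.items() :
--         ans += v * (v-1) // 2
--     return ans
-- ===== SOURCE B (Python) =====
-- def solve(N, A):
--     ps = [0]
--     s = 0
--     for i, a in enumerate(A):
--         s += a if i % 2 == 0 else -a
--         ps.append(s)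
--     ps.sort()
--     prev = ps[0]
--     run = 1
--     ans = 0
--     for x in ps[1:]:
--         if x == prev:
--             run += 1
--         else:
--             ans += run * (run - 1) // 2
--             prev = x
--             run = 1
--     return ans + run * (run - 1) // 2
-- ===== Notes on version B (the rewrite author's own statement) =====
-- stated objective: alternative
-- what changed: Replaces the hash-map counting (defaultdict of alternating prefix sums plus a second pass summing v*(v-1)//2) by sort-then-scan: collect all alternating prefix sums (seeded with 0), sort them, and count C(run,2) over maximal runs of equal adjacent values in one linear scan.
import Mathlib
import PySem

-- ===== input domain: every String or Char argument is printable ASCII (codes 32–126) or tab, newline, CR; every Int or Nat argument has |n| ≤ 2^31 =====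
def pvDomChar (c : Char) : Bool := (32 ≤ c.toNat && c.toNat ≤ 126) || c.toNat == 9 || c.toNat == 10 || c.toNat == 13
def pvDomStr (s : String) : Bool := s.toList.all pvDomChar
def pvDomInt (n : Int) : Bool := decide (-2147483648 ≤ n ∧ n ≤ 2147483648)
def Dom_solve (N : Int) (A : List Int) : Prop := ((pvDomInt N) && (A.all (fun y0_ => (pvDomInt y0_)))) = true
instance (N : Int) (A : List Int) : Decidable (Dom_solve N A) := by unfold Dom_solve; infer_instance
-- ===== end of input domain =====

-- B replaces A's hash-map counting + second summation pass by sort-then-scan over runs (alternative algorithm).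

-- ===== PORT A =====
def solve (N : Int) (A : List Int) : Int :=
  let d : PySem.Dict Int Int := (PySem.Dict.empty).insert 0 1
  let st := (PySem.List.enumerate A).foldl
    (fun (st : PySem.Dict Int Int × Int) ia =>
      let s := st.2 + (if PySem.Int.band ia.1 1 ≠ 0 then -1 else 1) * ia.2
      (st.1.modify s 0 (· + 1), s))
    (d, 0)
  st.1.items.foldl (fun ans kv => ans + PySem.Int.floordiv (kv.2 * (kv.2 - 1)) 2) 0

-- ===== PORT B =====
def solve_alt (N : Int) (A : List Int) : Int :=
  let st := (PySem.List.enumerate A).foldl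
    (fun (st : List Int × Int) ia =>
      let s := st.2 + (if PySem.Int.mod ia.1 2 = 0 then ia.2 else -ia.2)
      (st.1 ++ [s], s))
    ([0], 0)
  match PySem.List.sorted st.1 (fun x => x) false with
  | [] => 0   -- unreachable: ps is seeded with 0 (Python would raise on ps[0] here)
  | prev :: rest =>
    let fin := rest.foldl
      (fun (st : Int × Int × Int) x =>
        if x = st.1 then (st.1, st.2.1 + 1, st.2.2)
        else (x, 1, st.2.2 + PySem.Int.floordiv (st.2.1 * (st.2.1 - 1)) 2))
      (prev, 1, 0)
    fin.2.2 + PySem.Int.floordiv (fin.2.1 * (fin.2.1 - 1)) 2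

-- ===== PRECONDITION & SPEC =====
def Spec_solve (N : Int) (A : List Int) (out : Int) : Prop := out = solve_alt N A
instance (N : Int) (A : List Int) (out : Int) : Decidable (Spec_solve N A out) := by unfold Spec_solve; infer_instance

-- ===== CLAIM (what is proved, stated in full; the proofs are below) =====
def Claim_equal_solve : Prop := ∀ (N : Int) (A : List Int), Dom_solve N A → Spec_solve N A (solve N A)

-- ===== LEMMAS AND PROOFS =====

-- C(v,2) as both programs compute it.
def c2 (v : Int) : Int := PySem.Int.floordiv (v * (v - 1)) 2

-- Σ over the distinct values of M of C(multiplicity, 2): the common meaning of both programs.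
def SumC (M : List Int) : Int := ∑ k ∈ M.toFinset, c2 (M.count k)

-- the alternating-sign partial sums generated from the enumerate list, starting at s
def psAux : List (Int × Int) → Int → List Int
  | [], _ => []
  | ia :: t, s =>
    let s' := s + (if PySem.Int.band ia.1 1 ≠ 0 then -1 else 1) * ia.2
    s' :: psAux t s'

lemma sign_eq (i a : Int) :
    (if PySem.Int.mod i 2 = 0 then a else -a)
      = (if PySem.Int.band i 1 ≠ 0 then -1 else 1) * a := by
  rw [show PySem.Int.band i 1 = PySem.Int.mod i 2 from PySem.Int.band_one i]
  by_cases h : PySem.Int.mod i 2 = 0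
  · rw [if_pos h, if_neg (not_not_intro h), one_mul]
  · rw [if_neg h, if_pos h, neg_one_mul]

-- A's loop builds exactly the counter of the accumulated partial-sum list.
lemma A_loop (enum : List (Int × Int)) : ∀ (M : List Int) (s : Int),
    (enum.foldl
      (fun (st : PySem.Dict Int Int × Int) ia =>
        let s := st.2 + (if PySem.Int.band ia.1 1 ≠ 0 then -1 else 1) * ia.2
        (st.1.modify s 0 (· + 1), s))
      (PySem.Dict.counter M, s)).1
    = PySem.Dict.counter (M ++ psAux enum s) := by
  induction enum with
  | nil => intro M s; simp [psAux]
  | cons ia t ih =>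
    intro M s
    simp only [List.foldl_cons, psAux]
    rw [← PySem.Dict.counter_append_singleton, ih (M ++ [_]) _, List.append_assoc]
    rfl

-- B's first loop builds the same partial-sum list.
lemma B_loop1 (enum : List (Int × Int)) : ∀ (P : List Int) (s : Int),
    (enum.foldl
      (fun (st : List Int × Int) ia =>
        let s := st.2 + (if PySem.Int.mod ia.1 2 = 0 then ia.2 else -ia.2)
        (st.1 ++ [s], s))
      (P, s)).1
    = P ++ psAux enum s := by
  induction enum with
  | nil => intro P s; simp [psAux]
  | cons ia t ih =>
    intro P s
    simp only [List.foldl_cons, psAux]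
    rw [ih (P ++ [s + (if PySem.Int.mod ia.1 2 = 0 then ia.2 else -ia.2)])
          (s + (if PySem.Int.mod ia.1 2 = 0 then ia.2 else -ia.2)),
        sign_eq ia.1 ia.2, List.append_assoc]
    rfl

-- Σ f over a Nodup list equals the Finset sum over its elements.
lemma sum_map_nodup (f : Int → Int) : ∀ (l : List Int), l.Nodup →
    (l.map f).sum = ∑ k ∈ l.toFinset, f k := by
  intro l
  induction l with
  | nil => intro _; simp
  | cons x t ih =>
    intro hnd
    rcases List.nodup_cons.mp hnd with ⟨hx, hnt⟩
    rw [List.map_cons, List.sum_cons, ih hnt, List.toFinset_cons,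
        Finset.sum_insert (by simpa using hx)]

-- A's second pass over the counter of L computes SumC L.
lemma A_sum (L : List Int) :
    (PySem.Dict.counter L).items.foldl
        (fun ans kv => ans + PySem.Int.floordiv (kv.2 * (kv.2 - 1)) 2) 0
      = SumC L := by
  rw [PySem.List.foldl_add (g := fun kv : Int × Int => PySem.Int.floordiv (kv.2 * (kv.2 - 1)) 2),
      PySem.Dict.items_counter, List.map_map]
  have hnd : (PySem.Set.ofList L).Nodup := PySem.Set.nodup_ofList L
  have hset : (PySem.Set.ofList L).toFinset = L.toFinset := by
    ext k; simp [PySem.Set.mem_ofList]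
  simp only [Function.comp_def]
  rw [sum_map_nodup (fun k => PySem.Int.floordiv ((L.count k : Int) * ((L.count k : Int) - 1)) 2)
        (PySem.Set.ofList L) hnd, hset]
  simp only [SumC, c2, zero_add]

-- removing the head from both the index set and the counted list
lemma sum_erase_cons (x : Int) (t : List Int) :
    ∑ k ∈ ((x :: t).toFinset).erase x, c2 ((x :: t).count k)
      = ∑ k ∈ t.toFinset.erase x, c2 (t.count k) := by
  rw [List.toFinset_cons, Finset.erase_insert_eq_erase]
  refine Finset.sum_congr rfl ?_
  intro k hk
  have hne : k ≠ x := (Finset.mem_erase.mp hk).1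
  simp [List.count_cons, Ne.symm hne]

-- SumC is invariant under permutation (in particular under sorting).
lemma SumC_perm {L₁ L₂ : List Int} (h : L₁.Perm L₂) : SumC L₁ = SumC L₂ := by
  unfold SumC
  rw [List.toFinset_eq_of_perm _ _ h]
  exact Finset.sum_congr rfl (fun k _ => by rw [h.count_eq])

-- B's run scan over a sorted tail computes the run contributions plus the remaining groups.
lemma scan_eq (xs : List Int) : ∀ (prev run ans : Int),
    xs.Pairwise (· ≤ ·) → (∀ y ∈ xs, prev ≤ y) →
    (let fin := xs.foldl
        (fun (st : Int × Int × Int) x =>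
          if x = st.1 then (st.1, st.2.1 + 1, st.2.2)
          else (x, 1, st.2.2 + PySem.Int.floordiv (st.2.1 * (st.2.1 - 1)) 2))
        (prev, run, ans)
     fin.2.2 + PySem.Int.floordiv (fin.2.1 * (fin.2.1 - 1)) 2)
    = ans + c2 (run + xs.count prev) + ∑ k ∈ xs.toFinset.erase prev, c2 (xs.count k) := by
  induction xs with
  | nil => intro prev run ans _ _; simp [c2]
  | cons x t ih =>
    intro prev run ans hpw hle
    have hpt : t.Pairwise (· ≤ ·) := (List.pairwise_cons.mp hpw).2
    have hxt : ∀ y ∈ t, x ≤ y := (List.pairwise_cons.mp hpw).1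
    simp only [List.foldl_cons]
    by_cases hx : x = prev
    · subst hx
      rw [if_pos rfl]
      have h := ih x (run + 1) ans hpt hxt
      simp only at h
      rw [h, sum_erase_cons]
      have harg : run + 1 + ((t.count x : Nat) : Int) = run + (((x :: t).count x : Nat) : Int) := by
        rw [List.count_cons_self]; push_cast; ring
      rw [harg]
    · rw [if_neg hx]
      have hprevx : prev < x := lt_of_le_of_ne (hle x (List.mem_cons_self)) (Ne.symm hx)
      have hnot : prev ∉ (x :: t) := by
        intro hmem
        rcases List.mem_cons.mp hmem with h | h
        · exact hx h.symm
        · exact absurd (hxt _ h) (by omega)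
      have hc0 : (x :: t).count prev = 0 := List.count_eq_zero.mpr hnot
      have h := ih x 1 (ans + PySem.Int.floordiv (run * (run - 1)) 2) hpt hxt
      simp only at h
      rw [h]
      have hxm : x ∈ (x :: t).toFinset := by simp
      have hsplit : ∑ k ∈ (x :: t).toFinset, c2 ((x :: t).count k)
          = c2 ((x :: t).count x) + ∑ k ∈ ((x :: t).toFinset).erase x, c2 ((x :: t).count k) :=
        (Finset.add_sum_erase _ _ hxm).symm
      have herase : ((x :: t).toFinset).erase prev = (x :: t).toFinset :=
        Finset.erase_eq_of_notMem (by simpa using hnot)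
      rw [hc0, herase, hsplit, sum_erase_cons]
      have e2 : (((x :: t).count x : Nat) : Int) = 1 + ((t.count x : Nat) : Int) := by
        rw [List.count_cons_self]; push_cast; ring
      rw [e2]
      simp only [c2, Nat.cast_zero, add_zero]
      ring

-- the full scan over the sorted list computes SumC of that list
lemma scan_full (m : Int) (rest : List Int)
    (hpw : (m :: rest).Pairwise (· ≤ ·)) :
    (let fin := rest.foldl
        (fun (st : Int × Int × Int) x =>
          if x = st.1 then (st.1, st.2.1 + 1, st.2.2)
          else (x, 1, st.2.2 + PySem.Int.floordiv (st.2.1 * (st.2.1 - 1)) 2))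
        (m, 1, 0)
     fin.2.2 + PySem.Int.floordiv (fin.2.1 * (fin.2.1 - 1)) 2)
    = SumC (m :: rest) := by
  have hpt : rest.Pairwise (· ≤ ·) := (List.pairwise_cons.mp hpw).2
  have hmt : ∀ y ∈ rest, m ≤ y := (List.pairwise_cons.mp hpw).1
  have h1 := scan_eq rest m 1 0 hpt hmt
  simp only at h1
  rw [h1]
  have hm : m ∈ (m :: rest).toFinset := by simp
  have hsplit : SumC (m :: rest)
      = c2 ((m :: rest).count m) + ∑ k ∈ ((m :: rest).toFinset).erase m, c2 ((m :: rest).count k) :=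
    (Finset.add_sum_erase _ _ hm).symm
  rw [hsplit, sum_erase_cons]
  have e2 : (((m :: rest).count m : Nat) : Int) = 1 + ((rest.count m : Nat) : Int) := by
    rw [List.count_cons_self]; push_cast; ring
  rw [e2]
  simp only [c2]
  ring

-- ===== VERDICT (by name: the statement is the Claim_ definition above) =====
theorem solve_spec : Claim_equal_solve := by
  intro N A _
  show solve N A = solve_alt N A
  unfold solve solve_alt
  simp only []
  set enum := PySem.List.enumerate A with henum
  set L : List Int := [0] ++ psAux enum 0 with hL
  have hA1 : ((enum.foldl
      (fun (st : PySem.Dict Int Int × Int) ia =>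
        let s := st.2 + (if PySem.Int.band ia.1 1 ≠ 0 then -1 else 1) * ia.2
        (st.1.modify s 0 (· + 1), s))
      ((PySem.Dict.empty).insert 0 1, 0)).1) = PySem.Dict.counter L := by
    have h0 : (PySem.Dict.empty : PySem.Dict Int Int).insert 0 1 = PySem.Dict.counter [0] := rfl
    rw [h0]
    exact A_loop enum [0] 0
  have hB1 : ((enum.foldl
      (fun (st : List Int × Int) ia =>
        let s := st.2 + (if PySem.Int.mod ia.1 2 = 0 then ia.2 else -ia.2)
        (st.1 ++ [s], s))
      ([0], 0)).1) = L := B_loop1 enum [0] 0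
  rw [hA1, hB1, A_sum]
  have hnil : PySem.List.sorted L (fun x => x) false ≠ [] := by
    rw [Ne, PySem.List.sorted_eq_nil_iff]
    simp [hL]
  rcases hS : PySem.List.sorted L (fun x => x) false with _ | ⟨m, rest⟩
  · exact absurd hS hnil
  · have hpw : (m :: rest).Pairwise (· ≤ ·) := by
      have h := PySem.List.sorted_pairwise L (fun x => x)
      rw [hS] at h
      simpa using h
    have h2 := scan_full m rest hpw
    simp only at h2
    have hperm : SumC L = SumC (m :: rest) :=
      SumC_perm (by rw [← hS]; exact (PySem.List.sorted_perm L _ _).symm)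
    exact hperm.trans h2.symm
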